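-- pv_equiv track=rewrite | github.com/goudaren0528/goods-manager | update_goods.py | normalize_sku_key
-- ===== SOURCE A (Python) =====
-- def normalize_sku_key(sku_str):
--     """
--     归一化 SKU 键值：
--     1. 去除空白
--     2. 去重 (解决 Excel 中可能出现的重复规格)
--     3. 排序 (解决列顺序不一致的问题)
--     """
--     if not sku_str: return ""
--     parts = sku_str.split("|")
--     # 过滤空值、去重、排序
--     unique_parts = set()
--     cleaned_parts = []
--     for p in parts:
--         p = p.strip()
--         if p and p not in unique_parts:
--             unique_parts.add(p)
--             cleaned_parts.append(p)
--
--     sorted_parts = sorted(cleaned_parts)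
--     return "|".join(sorted_parts)
-- ===== SOURCE B (Python) =====
-- def normalize_sku_key(sku_str):
--     if not sku_str: return ""
--     stripped = [p.strip() for p in sku_str.split("|")]
--     parts = sorted(p for p in stripped if p)
--     out = []
--     for p in parts:
--         if not out or out[-1] != p:
--             out.append(p)
--     return "|".join(out)
-- ===== Notes on version B (the rewrite author's own statement) =====
-- stated objective: alternative
-- what changed: B sorts all stripped non-empty parts first (keeping duplicates) and removes duplicates in a single adjacent-comparison scan over the sorted list, instead of A's set-membership dedup during collection followed by sorting.
import Mathlib
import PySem

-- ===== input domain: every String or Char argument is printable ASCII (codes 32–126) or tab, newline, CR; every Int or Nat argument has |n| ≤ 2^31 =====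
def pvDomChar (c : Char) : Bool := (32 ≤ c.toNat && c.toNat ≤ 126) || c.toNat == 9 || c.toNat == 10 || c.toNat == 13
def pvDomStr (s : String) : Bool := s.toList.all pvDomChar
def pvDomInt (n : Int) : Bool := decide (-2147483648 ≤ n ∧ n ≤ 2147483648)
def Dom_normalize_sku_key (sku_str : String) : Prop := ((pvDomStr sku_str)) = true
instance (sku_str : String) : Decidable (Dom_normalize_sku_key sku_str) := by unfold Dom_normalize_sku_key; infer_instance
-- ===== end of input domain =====

-- B replaces A's set-membership dedup-then-sort by sort-then-adjacent-dedup scan (alternative decomposition, same cost).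

-- ===== PORT A =====
-- sku_str.split("|"): sep is the literal "|" ≠ "", so split? is always some; .getD [] is exact here
def normalize_sku_key (sku_str : String) : String :=
  if sku_str = "" then ""
  else
    let parts := (PySem.Str.split? sku_str "|").getD []
    let st := parts.foldl (fun (acc : PySem.Set String × List String) p0 =>
        let p := PySem.Str.strip p0
        if p ≠ "" ∧ p ∉ acc.1 then (PySem.Set.add acc.1 p, acc.2 ++ [p]) else acc)
      (PySem.Set.empty, [])
    let sorted_parts := PySem.List.sorted st.2 (fun x => x) false
    PySem.Str.join "|" sorted_parts

-- ===== PORT B =====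
def normalize_sku_key_alt (sku_str : String) : String :=
  if sku_str = "" then ""
  else
    let stripped := ((PySem.Str.split? sku_str "|").getD []).map PySem.Str.strip
    let parts := PySem.List.sorted (stripped.filter (fun p => p ≠ "")) (fun x => x) false
    let out := parts.foldl (fun (out : List String) p =>
        if out = [] ∨ PySem.List.pyGet? out (-1) ≠ some p then out ++ [p] else out) []
    PySem.Str.join "|" out

-- ===== PRECONDITION & SPEC =====
def Spec_normalize_sku_key (sku_str : String) (out : String) : Prop := out = normalize_sku_key_alt sku_str
instance (sku_str : String) (out : String) : Decidable (Spec_normalize_sku_key sku_str out) := by unfold Spec_normalize_sku_key; infer_instance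

-- ===== CLAIM (what is proved, stated in full; the proofs are below) =====
def Claim_equal_normalize_sku_key : Prop := ∀ (sku_str : String), Dom_normalize_sku_key sku_str → Spec_normalize_sku_key sku_str (normalize_sku_key sku_str)

-- ===== LEMMAS AND PROOFS =====

def adjRec (a : String) : List String → List String
  | [] => []
  | x :: xs => if x = a then adjRec a xs else x :: adjRec x xs

theorem pyGet?_neg_one_getLast? (acc : List String) (a : String) (h : acc.getLast? = some a) :
    PySem.List.pyGet? acc (-1) = some a := by
  have hne : acc ≠ [] := by rintro rfl; simp at h
  have hlen : 1 ≤ acc.length := List.length_pos_iff.mpr hne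
  simp [PySem.List.pyGet?, PySem.List.pyIdx?, hlen, ← List.getLast?_eq_getElem?, h]

theorem bfold_eq_adjRec (s : List String) : ∀ (acc : List String) (a : String),
    acc.getLast? = some a →
    s.foldl (fun (out : List String) p =>
        if out = [] ∨ PySem.List.pyGet? out (-1) ≠ some p then out ++ [p] else out) acc
      = acc ++ adjRec a s := by
  induction s with
  | nil => intro acc a h; simp [adjRec]
  | cons x xs ih =>
    intro acc a h
    have hne : acc ≠ [] := by rintro rfl; simp at h
    have hget := pyGet?_neg_one_getLast? acc a h
    by_cases hx : x = a
    · subst hx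
      simp only [List.foldl_cons, adjRec]
      rw [if_neg (by simp [hne, hget])]
      exact ih acc x h
    · simp only [List.foldl_cons, adjRec, if_neg hx]
      rw [if_pos (by rw [hget]; right; simpa using (Ne.symm hx))]
      rw [ih (acc ++ [x]) x (by simp)]
      simp

theorem mem_adjRec (s : List String) : ∀ (a : String), s.Pairwise (· ≤ ·) → (∀ y ∈ s, a ≤ y) →
    ∀ y, y ∈ adjRec a s ↔ y ∈ s ∧ y ≠ a := by
  induction s with
  | nil => intro a _ _ y; simp [adjRec]
  | cons x xs ih =>
    intro a hp hle y
    have hx : a ≤ x := hle x (by simp)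
    have hxs : ∀ y ∈ xs, x ≤ y := (List.pairwise_cons.mp hp).1
    have hps : xs.Pairwise (· ≤ ·) := (List.pairwise_cons.mp hp).2
    by_cases he : x = a
    · subst he
      rw [adjRec, if_pos rfl, ih x hps hxs y]
      constructor
      · exact fun ⟨h1, h2⟩ => ⟨List.mem_cons_of_mem _ h1, h2⟩
      · rintro ⟨h1, h2⟩
        rcases List.mem_cons.mp h1 with h | h
        · exact absurd h h2
        · exact ⟨h, h2⟩
    · rw [adjRec, if_neg he, List.mem_cons, ih x hps hxs y]
      constructor
      · rintro (rfl | ⟨h1, h2⟩)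
        · exact ⟨by simp, fun hya => he (hya ▸ rfl)⟩
        · refine ⟨List.mem_cons_of_mem _ h1, ?_⟩
          rintro rfl
          exact he (le_antisymm (hxs _ h1) hx)
      · rintro ⟨h1, h2⟩
        rcases List.mem_cons.mp h1 with rfl | h
        · exact Or.inl rfl
        · by_cases hyx : y = x
          · exact Or.inl hyx
          · exact Or.inr ⟨h, hyx⟩

theorem pairwise_adjRec (s : List String) : ∀ (a : String), s.Pairwise (· ≤ ·) → (∀ y ∈ s, a ≤ y) →
    (adjRec a s).Pairwise (· < ·) ∧ ∀ y ∈ adjRec a s, a < y := by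
  induction s with
  | nil => intro a _ _; simp [adjRec]
  | cons x xs ih =>
    intro a hp hle
    have hx : a ≤ x := hle x (by simp)
    have hxs : ∀ y ∈ xs, x ≤ y := (List.pairwise_cons.mp hp).1
    have hps : xs.Pairwise (· ≤ ·) := (List.pairwise_cons.mp hp).2
    by_cases he : x = a
    · subst he; rw [adjRec, if_pos rfl]; exact ih x hps hxs
    · rw [adjRec, if_neg he]
      obtain ⟨hpw, hgt⟩ := ih x hps hxs
      have hax : a < x := lt_of_le_of_ne hx (Ne.symm he)
      refine ⟨List.pairwise_cons.mpr ⟨hgt, hpw⟩, ?_⟩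
      intro y hy
      rcases List.mem_cons.mp hy with rfl | h
      · exact hax
      · exact lt_trans hax (hgt y h)

theorem afold_eq_dedup (l : List String) : ∀ (s : List String),
    l.foldl (fun (acc : PySem.Set String × List String) p0 =>
        if PySem.Str.strip p0 ≠ "" ∧ PySem.Str.strip p0 ∉ acc.1
        then (PySem.Set.add acc.1 (PySem.Str.strip p0), acc.2 ++ [PySem.Str.strip p0])
        else acc) (s, s)
      = (((l.map PySem.Str.strip).filter (fun p => p ≠ "")).foldl PySem.Set.add s,
         ((l.map PySem.Str.strip).filter (fun p => p ≠ "")).foldl PySem.Set.add s) := by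
  induction l with
  | nil => intro s; simp
  | cons p0 rest ih =>
    intro s
    simp only [List.foldl_cons, List.map_cons]
    set p := PySem.Str.strip p0 with hp
    by_cases h1 : p = ""
    · rw [if_neg (by simp [h1]), List.filter_cons, if_neg (by simp [h1])]
      exact ih s
    · by_cases h2 : p ∈ s
      · rw [if_neg (by simp [h2]), List.filter_cons, if_pos (by simp [h1])]
        have : PySem.Set.add s p = s := by simp [PySem.Set.add, h2]
        simp only [List.foldl_cons, this]
        exact ih s
      · rw [if_pos ⟨h1, h2⟩, List.filter_cons, if_pos (by simp [h1])]
        have : PySem.Set.add s p = s ++ [p] := by simp [PySem.Set.add, h2]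
        simp only [List.foldl_cons, this]
        exact ih (s ++ [p])

theorem main_eq (fp : List String) :
    PySem.List.sorted (PySem.List.dedup fp) (fun x => x) false
      = (PySem.List.sorted fp (fun x => x) false).foldl (fun (out : List String) p =>
          if out = [] ∨ PySem.List.pyGet? out (-1) ≠ some p then out ++ [p] else out) [] := by
  rcases hs : PySem.List.sorted fp (fun x => x) false with _ | ⟨x, xs⟩
  · have : fp = [] := by
      have := PySem.List.sorted_eq_nil_iff (xs := fp) (key := fun x => x) (rev := false)
      exact this.mp hs
    subst this
    simp [PySem.List.dedup, PySem.List.sorted, PySem.Set.ofList]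
  · have hpw : (x :: xs).Pairwise (· ≤ ·) := by
      have := PySem.List.sorted_pairwise (xs := fp) (key := fun x => x)
      rwa [hs] at this
    have hxs : ∀ y ∈ xs, x ≤ y := (List.pairwise_cons.mp hpw).1
    have hps : xs.Pairwise (· ≤ ·) := (List.pairwise_cons.mp hpw).2
    have hout : (x :: xs).foldl (fun (out : List String) p =>
          if out = [] ∨ PySem.List.pyGet? out (-1) ≠ some p then out ++ [p] else out) []
        = x :: adjRec x xs := by
      have h0 : (if ([] : List String) = [] ∨ PySem.List.pyGet? ([] : List String) (-1) ≠ some x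
          then ([] : List String) ++ [x] else []) = [x] := by simp
      rw [List.foldl_cons, h0, bfold_eq_adjRec xs [x] x (by simp)]
      simp
    rw [hout]
    obtain ⟨hpw', hgt⟩ := pairwise_adjRec xs x hps hxs
    have hlt : (x :: adjRec x xs).Pairwise (· < ·) := List.pairwise_cons.mpr ⟨hgt, hpw'⟩
    have hmemfp : ∀ y, y ∈ x :: adjRec x xs ↔ y ∈ PySem.List.dedup fp := by
      intro y
      rw [PySem.List.mem_dedup, List.mem_cons, mem_adjRec xs x hps hxs y]
      have hyfp : y ∈ fp ↔ y ∈ x :: xs := by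
        rw [← hs, PySem.List.mem_sorted]
      rw [hyfp, List.mem_cons]
      constructor
      · rintro (rfl | ⟨h1, _⟩)
        · exact Or.inl rfl
        · exact Or.inr h1
      · rintro (rfl | h)
        · exact Or.inl rfl
        · by_cases hyx : y = x
          · exact Or.inl hyx
          · exact Or.inr ⟨h, hyx⟩
    have hperm : (x :: adjRec x xs).Perm (PySem.List.dedup fp) :=
      (List.perm_ext_iff_of_nodup (hlt.imp ne_of_lt) (PySem.List.nodup_dedup fp)).mpr hmemfp
    exact PySem.List.sorted_eq_of_perm_of_pairwise_lt _ _ _ hperm hlt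


-- ===== VERDICT (by name: the statement is the Claim_ definition above) =====
theorem normalize_sku_key_spec : Claim_equal_normalize_sku_key := by
  intro s _
  unfold Spec_normalize_sku_key normalize_sku_key normalize_sku_key_alt
  by_cases h : s = ""
  · simp [h]
  · simp only [if_neg h]
    have hempty : (PySem.Set.empty : PySem.Set String) = ([] : List String) := rfl
    rw [hempty, afold_eq_dedup ((PySem.Str.split? s "|").getD []) []]
    have hded : (((((PySem.Str.split? s "|").getD []).map PySem.Str.strip).filter
        (fun p => p ≠ "")).foldl PySem.Set.add ([] : PySem.Set String))
        = PySem.List.dedup ((((PySem.Str.split? s "|").getD []).map PySem.Str.strip).filter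
        (fun p => p ≠ "")) := by
      rw [PySem.List.dedup_eq_ofList, PySem.Set.ofList_eq_foldl]
    rw [hded, main_eq]
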